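-- pv_equiv track=rewrite | github.com/Nuxnuxx/BUT3 | qualitealgo/td1-travauxpratique/exo3/main.py | rechMax
-- ===== SOURCE A (Python) =====
-- def rechMax(T):
--     a = T[0]
--     count_test = 0
--     for i in range(1, len(T)):
--         if T[i] > a:
--             count_test += 1
--             a = T[i]
--     return count_test, a
-- ===== SOURCE B (Python) =====
-- def rechMax(T):
--     # Pass 1: build the running-maximum prefix table.
--     rm = T[:1]
--     for x in T[1:]:
--         rm.append(rm[-1] if rm[-1] >= x else x)
--     # Pass 2: count positions where the running maximum changed.
--     cnt = 0
--     for p, q in zip(rm, rm[1:]):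
--         if p != q:
--             cnt += 1
--     return cnt, rm[-1]
-- ===== Notes on version B (the rewrite author's own statement) =====
-- stated objective: alternative
-- what changed: A fuses max-tracking and update-counting in one stateful loop; B first materialises the running-maximum prefix table, then counts adjacent changes in it with a separate zip pass and reads the max off its last entry.
import Mathlib
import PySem

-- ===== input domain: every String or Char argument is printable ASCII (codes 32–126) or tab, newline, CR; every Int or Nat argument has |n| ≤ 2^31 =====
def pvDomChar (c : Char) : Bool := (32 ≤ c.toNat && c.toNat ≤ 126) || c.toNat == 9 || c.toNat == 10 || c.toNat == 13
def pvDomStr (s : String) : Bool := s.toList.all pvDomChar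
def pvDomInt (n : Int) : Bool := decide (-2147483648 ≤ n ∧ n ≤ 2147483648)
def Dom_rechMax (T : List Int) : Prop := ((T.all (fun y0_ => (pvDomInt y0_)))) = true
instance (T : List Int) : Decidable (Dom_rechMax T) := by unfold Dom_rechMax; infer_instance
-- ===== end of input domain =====

-- B replaces A's fused update-and-count loop by a two-pass decomposition (build the
-- running-maximum prefix table, then count its adjacent changes); same O(n) cost.

-- ===== PORT A =====
def rechMax (T : List Int) : Int × Int :=
  let a := PySem.List.pyGetD T 0 0
  (PySem.List.pyRange 1 (T.length : Int) 1).foldl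
    (fun (s : Int × Int) i =>
      let x := PySem.List.pyGetD T i 0
      if x > s.2 then (s.1 + 1, x) else s) (0, a)

-- ===== PORT B =====
def rechMax_alt (T : List Int) : Int × Int :=
  let rm := (PySem.List.slice T (some 1) none).foldl
    (fun rm x =>
      rm ++ [if PySem.List.pyGetD rm (-1) 0 ≥ x then PySem.List.pyGetD rm (-1) 0 else x])
    (PySem.List.slice T none (some 1))
  let cnt := (rm.zip (PySem.List.slice rm (some 1) none)).foldl
    (fun (c : Int) p => if p.1 ≠ p.2 then c + 1 else c) 0
  (cnt, PySem.List.pyGetD rm (-1) 0)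

-- ===== PRECONDITION & SPEC =====
-- Pre_: A raises IndexError on the empty list (T[0]); excluded.
def Pre_rechMax (T : List Int) : Prop := T ≠ []
instance (T : List Int) : Decidable (Pre_rechMax T) := by unfold Pre_rechMax; infer_instance
def pvWitness_rechMax : List Int := ([1, 3, 2] : List Int)

def Spec_rechMax (T : List Int) (out : Int × Int) : Prop := out = rechMax_alt T
instance (T : List Int) (out : Int × Int) : Decidable (Spec_rechMax T out) := by unfold Spec_rechMax; infer_instance

-- ===== CLAIM (what is proved, stated in full; the proofs are below) =====
def Claim_equal_rechMax : Prop := ∀ (T : List Int), Dom_rechMax T → Pre_rechMax T → Spec_rechMax T (rechMax T)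

-- ===== LEMMAS AND PROOFS =====

-- A's loop state-step and B's table-step, named for the lemmas.
def pvStepA (s : Int × Int) (x : Int) : Int × Int :=
  if x > s.2 then (s.1 + 1, x) else s

def pvStepB (rm : List Int) (x : Int) : List Int :=
  rm ++ [if PySem.List.pyGetD rm (-1) 0 ≥ x then PySem.List.pyGetD rm (-1) 0 else x]

def pvCnt (rm : List Int) : Int :=
  (rm.zip (PySem.List.slice rm (some 1) none)).foldl
    (fun (c : Int) p => if p.1 ≠ p.2 then c + 1 else c) 0

lemma pv_zip_tail_append (rm : List Int) (h : rm ≠ []) (y : Int) :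
    (rm ++ [y]).zip (rm ++ [y]).tail = rm.zip rm.tail ++ [(rm.getLastD 0, y)] := by
  induction rm with
  | nil => exact absurd rfl h
  | cons r rs ih =>
    cases rs with
    | nil => simp
    | cons s rs' =>
      have := ih (by simp)
      simp only [List.cons_append, List.tail_cons, List.zip_cons_cons] at this ⊢
      rw [this]
      simp

lemma pv_cnt_append (rm : List Int) (h : rm ≠ []) (y : Int) :
    pvCnt (rm ++ [y]) = pvCnt rm + (if rm.getLastD 0 ≠ y then 1 else 0) := by
  unfold pvCnt
  rw [PySem.List.slice_from_one, PySem.List.slice_from_one, pv_zip_tail_append rm h y,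
    List.foldl_append]
  simp only [List.foldl_cons, List.foldl_nil]
  split <;> omega

lemma pv_last (rm : List Int) : PySem.List.pyGetD rm (-1) 0 = rm.getLastD 0 := by
  cases rm with
  | nil => rfl
  | cons r rs =>
    rw [PySem.List.pyGetD_neg_one _ 0 (by simp), List.getLastD_eq_getLast?,
      List.getLast?_eq_some_getLast (l := r :: rs) (by simp), Option.getD_some]

lemma pv_stepB_eq (rm : List Int) (x : Int) :
    pvStepB rm x = rm ++ [if rm.getLastD 0 ≥ x then rm.getLastD 0 else x] := by
  unfold pvStepB; rw [pv_last]

-- Main invariant: folding pvStepB over t from a nonempty table rm tracks A's fold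
-- from state (pvCnt rm, last rm).
lemma pv_inv (t : List Int) : ∀ (rm : List Int), rm ≠ [] →
    t.foldl pvStepB rm ≠ [] ∧
    pvCnt (t.foldl pvStepB rm) = (t.foldl pvStepA (pvCnt rm, rm.getLastD 0)).1 ∧
    (t.foldl pvStepB rm).getLastD 0 = (t.foldl pvStepA (pvCnt rm, rm.getLastD 0)).2 := by
  induction t with
  | nil => intro rm h; exact ⟨h, rfl, rfl⟩
  | cons x t' ih =>
    intro rm h
    have hne : pvStepB rm x ≠ [] := by rw [pv_stepB_eq]; simp
    have hstep : (pvCnt (pvStepB rm x), (pvStepB rm x).getLastD 0)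
        = pvStepA (pvCnt rm, rm.getLastD 0) x := by
      rw [pv_stepB_eq, pv_cnt_append rm h]
      unfold pvStepA
      by_cases hx : rm.getLastD 0 ≥ x
      · have hng : ¬ x > rm.getLastD 0 := by omega
        simp only [hx, if_true, hng, if_false]
        simp
      · have hgt : x > rm.getLastD 0 := by omega
        have hneq : rm.getLastD 0 ≠ x := by omega
        simp only [hx, if_false, hgt, if_true]
        simp only [List.getLastD_eq_getLast?] at hneq
        simp [hneq]
    obtain ⟨h1, h2, h3⟩ := ih (pvStepB rm x) hne
    refine ⟨h1, ?_, ?_⟩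
    · simp only [List.foldl_cons]; rw [h2, hstep]
    · simp only [List.foldl_cons]; rw [h3, hstep]

-- A's fold over pyRange indices equals a fold over the tail of T.
lemma pv_A_eq (T : List Int) :
    rechMax T = T.tail.foldl pvStepA (0, T.getD 0 0) := by
  unfold rechMax
  dsimp only
  rw [show (fun (s : Int × Int) i =>
        let x := PySem.List.pyGetD T i 0
        if x > s.2 then (s.1 + 1, x) else s)
      = (fun (s : Int × Int) i => pvStepA s (PySem.List.pyGetD T i 0)) from rfl]
  rw [PySem.List.foldl_pyRange_pyGetD' T 0 pvStepA (0, PySem.List.pyGetD T 0 0) (by omega)]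
  simp [PySem.List.pyGetD_zero, List.drop_one]

-- B's port, phrased through the named step and count functions.
lemma pv_B_eq (T : List Int) :
    rechMax_alt T =
      (pvCnt (T.tail.foldl pvStepB (T.take 1)),
       PySem.List.pyGetD (T.tail.foldl pvStepB (T.take 1)) (-1) 0) := by
  unfold rechMax_alt pvCnt pvStepB
  rw [PySem.List.slice_from_one]
  rw [show PySem.List.slice T none (some 1) = T.take 1 from by
    have := PySem.List.slice_to_natCast T 1; simpa using this]

-- ===== VERDICT (by name: the statement is the Claim_ definition above) =====
theorem rechMax_spec : Claim_equal_rechMax := by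
  intro T _ hpre
  unfold Spec_rechMax
  obtain ⟨h, t, rfl⟩ : ∃ h t, T = h :: t := by
    cases T with
    | nil => exact absurd rfl hpre
    | cons h t => exact ⟨h, t, rfl⟩
  rw [pv_A_eq, pv_B_eq]
  simp only [List.tail_cons, List.take_succ_cons, List.take_zero, List.getD,
    List.getElem?_cons_zero, Option.getD_some]
  obtain ⟨h1, h2, h3⟩ := pv_inv t [h] (by simp)
  have hcnt0 : pvCnt [h] = 0 := by unfold pvCnt; rw [PySem.List.slice_from_one]; rfl
  have hl0 : ([h] : List Int).getLastD 0 = h := rfl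
  rw [hcnt0, hl0] at h2 h3
  rw [pv_last, h2, h3]
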